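-- pv_equiv track=rewrite | github.com/DavidicLineage/MEA | mea.py | mea_order
-- ===== SOURCE A (Python) =====
-- def mea_order(n):
--     a = list(range(1, n+1))
--     result = []
--     while a:
--         m = len(a) // 2
--         if len(a) % 2 == 1:
--             result.append(a.pop(m))
--         else:
--             result.append(a.pop(m-1))
--             result.append(a.pop(m-1))
--         if not a:
--             break
--         result.append(a.pop(0))
--         result.append(a.pop())
--     return result
-- ===== SOURCE B (Python) =====
-- def mea_order(n):
--     # O(n): the remaining elements always form two symmetric contiguous runs
--     # [lo..a] and [b..hi]; track the four boundaries instead of popping lists.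
--     if n <= 0:
--         return []
--     res = []
--     m = (n + 1) // 2
--     res.append(m)
--     if n % 2 == 1:
--         a, b = m - 1, m + 1
--     else:
--         res.append(m + 1)
--         a, b = m - 1, m + 2
--     lo, hi = 1, n
--     while lo <= a:
--         res.append(lo)
--         res.append(hi)
--         lo += 1
--         hi -= 1
--         if lo > a:
--             break
--         res.append(a)
--         res.append(b)
--         a -= 1
--         b += 1
--     return res
-- ===== Notes on version B (the rewrite author's own statement) =====
-- stated objective: faster
-- what changed: A repeatedly pops elements out of a Python list by index (each pop shifts the tail, O(n) per step); B observes that the unused numbers always form two symmetric contiguous runs and emits the same sequence in one O(n) pass over four boundary pointers, never materialising the list.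
import Mathlib
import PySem

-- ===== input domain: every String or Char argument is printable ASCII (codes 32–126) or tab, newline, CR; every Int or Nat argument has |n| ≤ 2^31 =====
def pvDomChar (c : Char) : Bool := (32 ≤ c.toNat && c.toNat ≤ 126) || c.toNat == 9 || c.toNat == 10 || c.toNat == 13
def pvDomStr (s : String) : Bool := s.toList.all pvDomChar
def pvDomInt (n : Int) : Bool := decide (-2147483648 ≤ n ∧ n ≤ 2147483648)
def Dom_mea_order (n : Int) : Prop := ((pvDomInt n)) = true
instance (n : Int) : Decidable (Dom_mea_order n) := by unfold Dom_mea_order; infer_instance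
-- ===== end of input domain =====

-- B replaces A's quadratic pop-by-index loop with an O(n) scan that tracks the
-- boundaries of the two symmetric runs of still-unused numbers.

-- ===== PORT A =====
-- literal transliteration of A's while-loop: the list `a` with positional pops,
-- `result` the accumulator; each pop uses PySem.List.pop? (none = unreachable IndexError path).
def meaLoop (a : List Int) (result : List Int) : List Int :=
  if _h : a = [] then result
  else
    let m : Int := PySem.Int.floordiv (a.length : Int) 2
    if PySem.Int.mod (a.length : Int) 2 = 1 then
      match _h1 : PySem.List.pop? a m with
      | none => result
      | some (v, a1) =>
        let result1 := result ++ [v]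
        if a1 = [] then result1
        else
          match _h3 : PySem.List.pop? a1 0 with
          | none => result1
          | some (x, a2) =>
            match _h4 : PySem.List.pop? a2 with
            | none => result1 ++ [x]
            | some (y, a3) => meaLoop a3 (result1 ++ [x, y])
    else
      match _h1 : PySem.List.pop? a (m - 1) with
      | none => result
      | some (v, a1) =>
        match _h2 : PySem.List.pop? a1 (m - 1) with
        | none => result ++ [v]
        | some (w, a2) =>
          let result1 := result ++ [v, w]
          if a2 = [] then result1
          else
            match _h3 : PySem.List.pop? a2 0 with
            | none => result1
            | some (x, a3) =>
              match _h4 : PySem.List.pop? a3 with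
              | none => result1 ++ [x]
              | some (y, a4) => meaLoop a4 (result1 ++ [x, y])
termination_by a.length
decreasing_by
  · have e1 := PySem.List.length_of_pop?_eq_some _ _h1
    have e3 := PySem.List.length_of_pop?_eq_some _ _h3
    have e4 := PySem.List.length_of_pop?_eq_some _ _h4
    simp at e1 e3 e4; omega
  · have e1 := PySem.List.length_of_pop?_eq_some _ _h1
    have e2 := PySem.List.length_of_pop?_eq_some _ _h2
    have e3 := PySem.List.length_of_pop?_eq_some _ _h3
    have e4 := PySem.List.length_of_pop?_eq_some _ _h4
    simp at e1 e2 e3 e4; omega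

def mea_order (n : Int) : List Int :=
  meaLoop (PySem.List.pyRange 1 (n + 1) 1) []

-- ===== PORT B =====
-- literal transliteration of Source B's while-loop over the four boundary pointers.
def altLoop (lo hi a b : Int) (res : List Int) : List Int :=
  if lo ≤ a then
    let res1 := res ++ [lo, hi]
    if lo + 1 > a then res1
    else altLoop (lo + 1) (hi - 1) (a - 1) (b + 1) (res1 ++ [a, b])
  else res
termination_by (a + 1 - lo).toNat
decreasing_by omega

def mea_order_alt (n : Int) : List Int :=
  if n ≤ 0 then []
  else
    let m : Int := PySem.Int.floordiv (n + 1) 2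
    if PySem.Int.mod n 2 = 1 then altLoop 1 n (m - 1) (m + 1) [m]
    else altLoop 1 n (m - 1) (m + 2) [m, m + 1]

-- ===== PRECONDITION & SPEC =====
def Spec_mea_order (n : Int) (out : List Int) : Prop := out = mea_order_alt n
instance (n : Int) (out : List Int) : Decidable (Spec_mea_order n out) := by unfold Spec_mea_order; infer_instance

-- ===== CLAIM (what is proved, stated in full; the proofs are below) =====
def Claim_equal_mea_order : Prop := ∀ (n : Int), Dom_mea_order n → Spec_mea_order n (mea_order n)

-- ===== LEMMAS AND PROOFS =====

-- `ivl lo k` = the contiguous run lo, lo+1, …, lo+k-1 (proof-side description of A's list).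
def ivl (lo : Int) : Nat → List Int
  | 0 => []
  | k+1 => lo :: ivl (lo + 1) k

theorem ivl_length (k : Nat) : ∀ (lo : Int), (ivl lo k).length = k := by
  induction k with
  | zero => intro lo; rfl
  | succ k ih => intro lo; simp [ivl, ih]

theorem ivl_append (s : Nat) : ∀ (lo : Int) (u : Nat), ivl lo (s + u) = ivl lo s ++ ivl (lo + s) u := by
  induction s with
  | zero => intro lo u; simp [ivl]
  | succ s ih =>
    intro lo u
    have : s + 1 + u = (s + u) + 1 := by omega
    rw [this]
    simp only [ivl, ih (lo + 1) u]
    simp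
    ring_nf

theorem ivl_snoc (lo : Int) (k : Nat) : ivl lo (k + 1) = ivl lo k ++ [lo + k] := by
  have := ivl_append k lo 1
  simpa [ivl] using this

theorem pyRange_eq_ivl (k : Nat) : ∀ (lo : Int), PySem.List.pyRange lo (lo + k) 1 = ivl lo k := by
  induction k with
  | zero => intro lo; simp [PySem.List.pyRange_one_eq_nil, ivl]
  | succ k ih =>
    intro lo
    rw [PySem.List.pyRange_one_cons (by omega)]
    have : lo + (↑(k + 1) : Int) = (lo + 1) + (k : Int) := by push_cast; ring
    rw [this, ih (lo + 1)]
    rfl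

theorem popMid {α : Type} (xs : List α) (y : α) (ys : List α) :
    PySem.List.pop? (xs ++ y :: ys) (xs.length : Int) = some (y, xs ++ ys) := by
  have h : xs.length < (xs ++ y :: ys).length := by simp
  rw [PySem.List.pop?_natCast _ _ h]
  have g1 : (xs ++ y :: ys)[xs.length]'h = y := by
    rw [List.getElem_append_right (Nat.le_refl _)]
    simp
  have g2 : (xs ++ y :: ys).eraseIdx xs.length = xs ++ ys := by
    rw [List.eraseIdx_append_of_length_le (Nat.le_refl _)]
    simp
  rw [g1, g2]

theorem altLoop_nil (lo hi a b : Int) (res : List Int) (h : ¬ lo ≤ a) :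
    altLoop lo hi a b res = res := by
  rw [altLoop]; simp [h]

theorem altLoop_step (lo hi a b : Int) (res : List Int) (h : lo ≤ a) (h2 : ¬ lo + 1 > a) :
    altLoop lo hi a b res = altLoop (lo + 1) (hi - 1) (a - 1) (b + 1) (res ++ [lo, hi] ++ [a, b]) := by
  rw [altLoop]; simp [h, h2]

theorem key (k : Nat) : ∀ (lo b : Int) (res : List Int),
    meaLoop (ivl lo k ++ ivl b k) (res ++ [lo - 1, b + k]) =
    altLoop (lo - 1) (b + k) (lo + k - 1) b res := by
  induction k using Nat.strong_induction_on with
  | _ k IH =>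
  match k with
  | 0 =>
    intro lo b res
    rw [meaLoop, altLoop]
    simp [ivl]
  | (j+1) =>
    intro lo b res
    have hne : ivl lo (j+1) ++ ivl b (j+1) ≠ [] := by simp [ivl]
    have hlen : (ivl lo (j+1) ++ ivl b (j+1)).length = 2*j+2 := by
      simp [ivl_length]; omega
    have hm : PySem.Int.floordiv (((2*j+2 : Nat)) : Int) 2 = (j:Int)+1 := by
      rw [PySem.Int.floordiv_eq_ediv_of_pos (by norm_num)]; push_cast; omega
    have hmod : PySem.Int.mod (((2*j+2 : Nat)) : Int) 2 ≠ 1 := by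
      rw [PySem.Int.mod_eq_emod_of_pos (by norm_num)]; push_cast; omega
    have hL : ivl lo (j+1) ++ ivl b (j+1) = ivl lo j ++ (lo+(j:Int)) :: ivl b (j+1) := by
      rw [ivl_snoc]; simp
    have hp1 : PySem.List.pop? (ivl lo (j+1) ++ ivl b (j+1)) ((j:Int)+1-1)
        = some (lo+(j:Int), ivl lo j ++ ivl b (j+1)) := by
      rw [hL]
      have := popMid (ivl lo j) (lo+(j:Int)) (ivl b (j+1))
      rw [ivl_length] at this
      simpa using this
    have hp2 : PySem.List.pop? (ivl lo j ++ ivl b (j+1)) ((j:Int)+1-1)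
        = some (b, ivl lo j ++ ivl (b+1) j) := by
      have := popMid (ivl lo j) b (ivl (b+1) j)
      rw [ivl_length] at this
      simpa [ivl] using this
    rw [meaLoop, dif_neg hne]
    simp only [hlen, hmod, if_false]
    split
    · next heq => rw [hlen, hm, hp1] at heq; cases heq
    next v a1 heq =>
    rw [hlen, hm, hp1] at heq
    obtain ⟨rfl, rfl⟩ : lo + (j:Int) = v ∧ ivl lo j ++ ivl b (j+1) = a1 := by
      simpa using heq
    split
    · next heq2 => rw [hlen, hm, hp2] at heq2; cases heq2
    next w a2 heq2 =>
    rw [hlen, hm, hp2] at heq2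
    obtain ⟨rfl, rfl⟩ : b = w ∧ ivl lo j ++ ivl (b+1) j = a2 := by
      simpa using heq2
    match j with
    | 0 =>
      rw [if_pos (by simp [ivl])]
      rw [altLoop_step _ _ _ _ _ (by push_cast; omega) (by push_cast; omega)]
      rw [altLoop_nil _ _ _ _ _ (by omega)]
      push_cast
      simp
    | (i+1) =>
      rw [if_neg (by simp [ivl])]
      have hp3 : PySem.List.pop? (ivl lo (i+1) ++ ivl (b+1) (i+1)) 0
          = some (lo, ivl (lo+1) i ++ ivl (b+1) (i+1)) := by
        simp [ivl, PySem.List.pop?_zero_cons]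
      have hp4 : PySem.List.pop? (ivl (lo+1) i ++ ivl (b+1) (i+1))
          = some (b+1+(i:Int), ivl (lo+1) i ++ ivl (b+1) i) := by
        rw [ivl_snoc (b+1) i, ← List.append_assoc]
        exact PySem.List.pop?_last _ _
      split
      · next heq3 => rw [hp3] at heq3; cases heq3
      next x a3 heq3 =>
      rw [hp3] at heq3
      obtain ⟨rfl, rfl⟩ : lo = x ∧ ivl (lo+1) i ++ ivl (b+1) (i+1) = a3 := by
        simpa using heq3
      split
      · next heq4 => rw [hp4] at heq4; cases heq4
      next y a4 heq4 =>
      rw [hp4] at heq4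
      obtain ⟨rfl, rfl⟩ : b+1+(i:Int) = y ∧ ivl (lo+1) i ++ ivl (b+1) i = a4 := by
        simpa using heq4
      have hIH := IH i (by omega) (lo+1) (b+1) (res ++ [lo - 1, b + ((i:Int)+1+1)] ++ [lo + ((i:Int)+1), b])
      rw [show lo+1-1 = lo from by ring] at hIH
      rw [altLoop_step _ _ _ _ _ (by push_cast; omega) (by push_cast; omega)]
      push_cast at hIH ⊢
      ring_nf at hIH ⊢
      exact hIH

theorem main_eq (n : Int) : mea_order n = mea_order_alt n := by
  unfold mea_order mea_order_alt
  by_cases hn : n ≤ 0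
  · rw [PySem.List.pyRange_one_eq_nil (by omega), if_pos hn, meaLoop]
    simp
  · rw [if_neg hn]
    have hr : PySem.List.pyRange 1 (n+1) 1 = ivl 1 n.toNat := by
      rw [show n + 1 = 1 + (n.toNat : Int) by omega, pyRange_eq_ivl]
    rw [hr]
    rcases Nat.even_or_odd n.toNat with ⟨t, ht⟩ | ⟨t, ht⟩
    · -- N = t + t, t ≥ 1
      match t, ht with
      | 0, ht => omega
      | (u+1), ht =>
      rw [ht]
      have hne : ivl (1:Int) ((u+1)+(u+1)) ≠ [] := by
        rw [show (u+1)+(u+1) = (2*u+1)+1 from by omega]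
        simp [ivl]
      have hlen : (ivl (1:Int) ((u+1)+(u+1))).length = 2*u+2 := by
        rw [ivl_length]; omega
      have hm : PySem.Int.floordiv (((2*u+2 : Nat)) : Int) 2 = (u:Int)+1 := by
        rw [PySem.Int.floordiv_eq_ediv_of_pos (by norm_num)]; push_cast; omega
      have hmod : PySem.Int.mod (((2*u+2 : Nat)) : Int) 2 ≠ 1 := by
        rw [PySem.Int.mod_eq_emod_of_pos (by norm_num)]; push_cast; omega
      have hsplit : ivl (1:Int) ((u+1)+(u+1)) = ivl 1 u ++ ((1:Int)+(u:Int)) :: ivl ((u:Int)+2) (u+1) := by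
        rw [show (u+1)+(u+1) = u + (u+2) from by omega, ivl_append]
        simp [ivl]
        refine ⟨by ring, ?_⟩
        congr 1
        ring
      have hp1 : PySem.List.pop? (ivl (1:Int) ((u+1)+(u+1))) ((u:Int)+1-1)
          = some ((1:Int)+(u:Int), ivl 1 u ++ ivl ((u:Int)+2) (u+1)) := by
        rw [hsplit]
        have := popMid (ivl (1:Int) u) ((1:Int)+(u:Int)) (ivl ((u:Int)+2) (u+1))
        rw [ivl_length] at this
        simpa using this
      have hp2 : PySem.List.pop? (ivl (1:Int) u ++ ivl ((u:Int)+2) (u+1)) ((u:Int)+1-1)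
          = some ((u:Int)+2, ivl 1 u ++ ivl ((u:Int)+3) u) := by
        have := popMid (ivl (1:Int) u) ((u:Int)+2) (ivl ((u:Int)+3) u)
        rw [ivl_length] at this
        have hc : ivl ((u:Int)+2) (u+1) = ((u:Int)+2) :: ivl ((u:Int)+3) u := by
          show ((u:Int)+2) :: ivl ((u:Int)+2+1) u = _
          rw [show ((u:Int)+2+1) = (u:Int)+3 from by ring]
        rw [hc]
        simpa using this
      rw [meaLoop, dif_neg hne]
      simp only [hlen, hmod, if_false]
      split
      · next heq => rw [hlen, hm, hp1] at heq; cases heq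
      next v a1 heq =>
      rw [hlen, hm, hp1] at heq
      obtain ⟨rfl, rfl⟩ : (1:Int)+(u:Int) = v ∧ ivl 1 u ++ ivl ((u:Int)+2) (u+1) = a1 := by
        simpa using heq
      split
      · next heq2 => rw [hlen, hm, hp2] at heq2; cases heq2
      next w a2 heq2 =>
      rw [hlen, hm, hp2] at heq2
      obtain ⟨rfl, rfl⟩ : (u:Int)+2 = w ∧ ivl 1 u ++ ivl ((u:Int)+3) u = a2 := by
        simpa using heq2
      have hmodB : PySem.Int.mod n 2 ≠ 1 := by
        rw [PySem.Int.mod_eq_emod_of_pos (by norm_num)]; omega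
      have hmB : PySem.Int.floordiv (n+1) 2 = (u:Int)+1 := by
        rw [PySem.Int.floordiv_eq_ediv_of_pos (by norm_num)]; omega
      simp only [hmodB, hmB, if_false]
      match u, ht with
      | 0, ht =>
        rw [if_pos (by simp [ivl])]
        rw [altLoop_nil _ _ _ _ _ (by omega)]
        norm_num
      | (i+1), ht =>
        rw [if_neg (by simp [ivl])]
        have hcons : ivl (1:Int) (i+1) ++ ivl ((i:Int)+1+3) (i+1)
            = 1 :: (ivl (2:Int) i ++ ivl ((i:Int)+1+3) (i+1)) := by
          simp [ivl]
        have hp3 : PySem.List.pop? (ivl (1:Int) (i+1) ++ ivl ((i:Int)+1+3) (i+1)) 0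
            = some (1, ivl (2:Int) i ++ ivl ((i:Int)+1+3) (i+1)) := by
          rw [hcons, PySem.List.pop?_zero_cons]
        have hp4 : PySem.List.pop? (ivl (2:Int) i ++ ivl ((i:Int)+1+3) (i+1))
            = some ((i:Int)+1+3+(i:Int), ivl (2:Int) i ++ ivl ((i:Int)+1+3) i) := by
          rw [ivl_snoc ((i:Int)+1+3) i, ← List.append_assoc]
          exact PySem.List.pop?_last _ _
        split
        · next heq3 =>
          push_cast at heq3
          rw [hp3] at heq3; cases heq3
        next x a3 heq3 =>
        push_cast at heq3
        rw [hp3] at heq3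
        obtain ⟨rfl, rfl⟩ : (1:Int) = x ∧ ivl (2:Int) i ++ ivl ((i:Int)+1+3) (i+1) = a3 := by
          simpa using heq3
        split
        · next heq4 => rw [hp4] at heq4; cases heq4
        next y a4 heq4 =>
        rw [hp4] at heq4
        obtain ⟨rfl, rfl⟩ : (i:Int)+1+3+(i:Int) = y ∧ ivl (2:Int) i ++ ivl ((i:Int)+1+3) i = a4 := by
          simpa using heq4
        have hK := key i 2 ((i:Int)+1+3) [(1:Int)+((i:Int)+1), (i:Int)+1+2]
        have hn2 : n = 2*(i:Int)+4 := by omega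
        rw [hn2]
        simp only [List.nil_append]
        push_cast at hK ⊢
        ring_nf at hK ⊢
        exact hK
    · -- N = 2t+1
      rw [ht]
      have hne : ivl (1:Int) (2*t+1) ≠ [] := by simp [ivl]
      have hlen : (ivl (1:Int) (2*t+1)).length = 2*t+1 := ivl_length _ _
      have hm : PySem.Int.floordiv (((2*t+1 : Nat)) : Int) 2 = (t:Int) := by
        rw [PySem.Int.floordiv_eq_ediv_of_pos (by norm_num)]; push_cast; omega
      have hmod : PySem.Int.mod (((2*t+1 : Nat)) : Int) 2 = 1 := by
        rw [PySem.Int.mod_eq_emod_of_pos (by norm_num)]; push_cast; omega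
      have hsplit : ivl (1:Int) (2*t+1) = ivl 1 t ++ ((1:Int)+(t:Int)) :: ivl ((t:Int)+2) t := by
        rw [show 2*t+1 = t + (t+1) from by omega, ivl_append]
        simp [ivl]
        congr 1
        ring
      have hp1 : PySem.List.pop? (ivl (1:Int) (2*t+1)) ((t:Int))
          = some ((1:Int)+(t:Int), ivl 1 t ++ ivl ((t:Int)+2) t) := by
        rw [hsplit]
        have := popMid (ivl (1:Int) t) ((1:Int)+(t:Int)) (ivl ((t:Int)+2) t)
        rw [ivl_length] at this
        exact this
      rw [meaLoop, dif_neg hne]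
      simp only [hlen, hmod, if_pos]
      split
      · next heq => rw [hlen, hm, hp1] at heq; cases heq
      next v a1 heq =>
      rw [hlen, hm, hp1] at heq
      obtain ⟨rfl, rfl⟩ : (1:Int)+(t:Int) = v ∧ ivl 1 t ++ ivl ((t:Int)+2) t = a1 := by
        simpa using heq
      -- B side conditions
      have hmodB : PySem.Int.mod n 2 = 1 := by
        rw [PySem.Int.mod_eq_emod_of_pos (by norm_num)]; omega
      have hmB : PySem.Int.floordiv (n+1) 2 = (t:Int)+1 := by
        rw [PySem.Int.floordiv_eq_ediv_of_pos (by norm_num)]; omega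
      simp only [hmodB, hmB, if_pos]
      match t, ht with
      | 0, ht =>
        rw [if_pos (by simp [ivl])]
        rw [altLoop_nil _ _ _ _ _ (by omega)]
        norm_num
      | (u+1), ht =>
        rw [if_neg (by simp [ivl])]
        have hcons : ivl (1:Int) (u+1) ++ ivl ((u:Int)+1+2) (u+1)
            = 1 :: (ivl (2:Int) u ++ ivl ((u:Int)+1+2) (u+1)) := by
          simp [ivl]
        have hp3 : PySem.List.pop? (ivl (1:Int) (u+1) ++ ivl ((u:Int)+1+2) (u+1)) 0
            = some (1, ivl (2:Int) u ++ ivl ((u:Int)+1+2) (u+1)) := by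
          rw [hcons, PySem.List.pop?_zero_cons]
        have hp4 : PySem.List.pop? (ivl (2:Int) u ++ ivl ((u:Int)+1+2) (u+1))
            = some ((u:Int)+1+2+(u:Int), ivl (2:Int) u ++ ivl ((u:Int)+1+2) u) := by
          rw [ivl_snoc ((u:Int)+1+2) u, ← List.append_assoc]
          exact PySem.List.pop?_last _ _
        split
        · next heq3 =>
          push_cast at heq3
          rw [hp3] at heq3; cases heq3
        next x a3 heq3 =>
        push_cast at heq3
        rw [hp3] at heq3
        obtain ⟨rfl, rfl⟩ : (1:Int) = x ∧ ivl (2:Int) u ++ ivl ((u:Int)+1+2) (u+1) = a3 := by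
          simpa using heq3
        split
        · next heq4 => rw [hp4] at heq4; cases heq4
        next y a4 heq4 =>
        rw [hp4] at heq4
        obtain ⟨rfl, rfl⟩ : (u:Int)+1+2+(u:Int) = y ∧ ivl (2:Int) u ++ ivl ((u:Int)+1+2) u = a4 := by
          simpa using heq4
        have hK := key u 2 ((u:Int)+1+2) [(1:Int)+((u:Int)+1)]
        have hn2 : n = 2*(u:Int)+3 := by omega
        rw [hn2]
        simp only [List.nil_append]
        push_cast at hK ⊢
        ring_nf at hK ⊢
        exact hK

-- ===== VERDICT (by name: the statement is the Claim_ definition above) =====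
theorem mea_order_spec : Claim_equal_mea_order := by
  intro n _
  unfold Spec_mea_order
  exact main_eq n
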